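-- pv_equiv track=rewrite | github.com/zjezdzalka/net-bruteforce2 | faster.py | _str2binl
-- ===== SOURCE A (Python) =====
-- def _str2binl(s: str) -> list:
--     # Convert string to little-endian word array & pad
--     nblk = ((len(s) + 8) >> 6) + 1
--     blks = [0] * (nblk * 16)
--     for i, ch in enumerate(s):
--         blks[i >> 2] |= (ord(ch) & 0xFF) << ((i % 4) * 8)
--     i = len(s)
--     blks[i >> 2] |= 0x80 << ((i % 4) * 8)
--     blks[nblk*16 - 2] = len(s) * 8
--     return blks
-- ===== SOURCE B (Python) =====
-- def _str2binl(s: str) -> list: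
--     # Gather each 32-bit word directly from the padded byte stream, little-endian.
--     n = len(s)
--     total = (((n + 8) >> 6) + 1) * 16
--
--     def byte(j):
--         if j < n:
--             return ord(s[j]) & 0xFF
--         if j == n:
--             return 0x80
--         return 0
--
--     words = [
--         byte(4 * w)
--         + (byte(4 * w + 1) << 8)
--         + (byte(4 * w + 2) << 16)
--         + (byte(4 * w + 3) << 24)
--         for w in range(total)
--     ]
--     words[total - 2] = n * 8
--     return words
-- ===== Notes on version B (the rewrite author's own statement) =====
-- stated objective: alternative
-- what changed: A scatters each character into a zero word-array with an in-place bit-OR per byte lane; B instead gathers every 32-bit word directly in one comprehension over word indices, summing the four padded-message bytes (char bytes, the 0x80 sentinel, zeros) shifted into place, then overwrites the length word.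
import Mathlib
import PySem

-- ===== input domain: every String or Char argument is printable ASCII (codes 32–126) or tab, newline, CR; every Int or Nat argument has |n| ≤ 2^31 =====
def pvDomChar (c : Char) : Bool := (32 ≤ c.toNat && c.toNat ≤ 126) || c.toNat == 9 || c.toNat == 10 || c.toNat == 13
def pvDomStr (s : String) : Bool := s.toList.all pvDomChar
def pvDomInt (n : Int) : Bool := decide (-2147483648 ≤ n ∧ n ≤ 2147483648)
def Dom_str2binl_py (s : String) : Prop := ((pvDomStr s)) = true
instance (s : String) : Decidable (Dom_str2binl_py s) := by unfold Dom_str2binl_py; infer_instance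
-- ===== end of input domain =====

-- B gathers each padded-message word directly (per-word byte sum) instead of A's
-- scatter-OR loop over characters; objective: alternative decomposition, same cost.

-- ===== PORT A =====
def str2binl_py (s : String) : List Int :=
  let n : Int := (s.toList.length : Int)
  let nblk : Int := ((n + 8) >>> (6 : Nat)) + 1
  let blks0 : List Int := List.replicate (nblk * 16).toNat 0
  let blks1 : List Int := (PySem.List.enumerate s.toList 0).foldl
    (fun bl p =>
      PySem.List.pySetD bl ((p.1 : Int) >>> (2 : Nat))
        (PySem.Int.bor (PySem.List.pyGetD bl ((p.1 : Int) >>> (2 : Nat)) 0)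
          (PySem.Int.band ((p.2.toNat : Int)) 0xFF <<< (PySem.Int.mod p.1 4 * 8).toNat)))
    blks0
  let blks2 : List Int :=
    PySem.List.pySetD blks1 (n >>> (2 : Nat))
      (PySem.Int.bor (PySem.List.pyGetD blks1 (n >>> (2 : Nat)) 0)
        ((0x80 : Int) <<< (PySem.Int.mod n 4 * 8).toNat))
  PySem.List.pySetD blks2 (nblk * 16 - 2) (n * 8)

-- ===== PORT B =====
-- byte j of the padded message (Source B's helper `byte`)
def pvByte (cs : List Char) (j : Nat) : Int :=
  if j < cs.length then PySem.Int.band ((cs.getD j default).toNat : Int) 0xFF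
  else if j = cs.length then 0x80 else 0

def str2binl_py_alt (s : String) : List Int :=
  let cs : List Char := s.toList
  let total : Nat := (((cs.length + 8) >>> 6) + 1) * 16
  let words : List Int := (List.range total).map (fun w =>
    pvByte cs (4 * w)
      + (pvByte cs (4 * w + 1) <<< (8 : Nat))
      + (pvByte cs (4 * w + 2) <<< (16 : Nat))
      + (pvByte cs (4 * w + 3) <<< (24 : Nat)))
  words.set (total - 2) ((cs.length : Int) * 8)

-- ===== PRECONDITION & SPEC =====
def Spec_str2binl_py (s : String) (out : List Int) : Prop := out = str2binl_py_alt s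
instance (s : String) (out : List Int) : Decidable (Spec_str2binl_py s out) := by unfold Spec_str2binl_py; infer_instance

-- ===== CLAIM (what is proved, stated in full; the proofs are below) =====
def Claim_equal_str2binl_py : Prop := ∀ (s : String), Dom_str2binl_py s → Spec_str2binl_py s (str2binl_py s)

-- ===== LEMMAS AND PROOFS =====

def pvBLoop (cs : List Char) (j : Nat) : Int :=
  if j < cs.length then PySem.Int.band ((cs.getD j default).toNat : Int) 0xFF else 0

def pvWOr (f : Nat → Int) (w : Nat) : Int :=
  PySem.Int.bor (PySem.Int.bor (PySem.Int.bor (f (4 * w))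
    (f (4 * w + 1) <<< (8 : Nat))) (f (4 * w + 2) <<< (16 : Nat))) (f (4 * w + 3) <<< (24 : Nat))

theorem pv_nat_lor_shift (a b t : Nat) (h : a < 2 ^ t) : a ||| (b <<< t) = a + b <<< t := by
  apply Nat.eq_of_testBit_eq
  intro j
  rw [Nat.testBit_lor, show a + b <<< t = 2 ^ t * b + a by rw [Nat.shiftLeft_eq]; ring,
    Nat.testBit_two_pow_mul_add b h j, Nat.testBit_shiftLeft]
  rcases lt_or_ge j t with hj | hj
  · simp [hj, Nat.not_le.mpr hj]
  · have : a.testBit j = false :=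
      Nat.testBit_lt_two_pow (lt_of_lt_of_le h (Nat.pow_le_pow_right (by norm_num) hj))
    simp [this, hj, Nat.not_lt.mpr hj]

theorem pvWOr_eq_add (f : Nat → Int) (w : Nat)
    (hf : ∀ j, 0 ≤ f j ∧ f j < 256) :
    pvWOr f w = f (4 * w) + (f (4 * w + 1) <<< (8 : Nat))
      + (f (4 * w + 2) <<< (16 : Nat)) + (f (4 * w + 3) <<< (24 : Nat)) := by
  obtain ⟨b0, e0, l0⟩ : ∃ b : Nat, f (4 * w) = (b : Int) ∧ b < 256 :=
    ⟨(f (4 * w)).toNat, (Int.toNat_of_nonneg (hf _).1).symm, by have := hf (4 * w); omega⟩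
  obtain ⟨b1, e1, l1⟩ : ∃ b : Nat, f (4 * w + 1) = (b : Int) ∧ b < 256 :=
    ⟨_, (Int.toNat_of_nonneg (hf _).1).symm, by have := hf (4 * w + 1); omega⟩
  obtain ⟨b2, e2, l2⟩ : ∃ b : Nat, f (4 * w + 2) = (b : Int) ∧ b < 256 :=
    ⟨_, (Int.toNat_of_nonneg (hf _).1).symm, by have := hf (4 * w + 2); omega⟩
  obtain ⟨b3, e3, l3⟩ : ∃ b : Nat, f (4 * w + 3) = (b : Int) ∧ b < 256 :=
    ⟨_, (Int.toNat_of_nonneg (hf _).1).symm, by have := hf (4 * w + 3); omega⟩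
  unfold pvWOr
  rw [e0, e1, e2, e3]
  have hs : ∀ (m k : Nat), ((m : Int) <<< k) = ((m <<< k : Nat) : Int) := by intro m k; simp
  rw [hs, hs, hs, PySem.Int.bor_natCast, PySem.Int.bor_natCast, PySem.Int.bor_natCast]
  have hb1 : b1 <<< 8 = b1 * 256 := by rw [Nat.shiftLeft_eq]
  have hb2 : b2 <<< 16 = b2 * 65536 := by rw [Nat.shiftLeft_eq]
  have hb3 : b3 <<< 24 = b3 * 16777216 := by rw [Nat.shiftLeft_eq]
  rw [pv_nat_lor_shift _ _ _ (show b0 < 2 ^ 8 by omega),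
      pv_nat_lor_shift _ _ _ (show b0 + b1 <<< 8 < 2 ^ 16 by rw [hb1]; omega),
      pv_nat_lor_shift _ _ _ (show b0 + b1 <<< 8 + b2 <<< 16 < 2 ^ 24 by rw [hb1, hb2]; omega)]
  push_cast
  ring

theorem pv_zero_bor (a : Int) : PySem.Int.bor 0 a = a := by
  rw [PySem.Int.bor_comm, PySem.Int.bor_zero]

theorem pv_step (N m : Nat) (f g : Nat → Int) (v : Int)
    (hm : m / 4 < N)
    (hfg : ∀ p, p ≠ m → g p = f p)
    (hf0 : ∀ p, m ≤ p → f p = 0) (hgm : g m = v) :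
    ((List.range N).map (pvWOr f)).set (m / 4)
      (PySem.Int.bor (((List.range N).map (pvWOr f)).getD (m / 4) 0) (v <<< (m % 4 * 8)))
      = (List.range N).map (pvWOr g) := by
  have hget : (((List.range N).map (pvWOr f)).getD (m / 4) 0) = pvWOr f (m / 4) := by
    rw [List.getD_eq_getElem?_getD]
    simp [List.getElem?_map, List.getElem?_range, hm]
  rw [hget]
  apply List.ext_getElem
  · simp
  · intro j hj hj'
    simp only [List.length_set, List.length_map, List.length_range] at hj
    rw [List.getElem_set]
    simp only [List.getElem_map, List.getElem_range]
    by_cases hjm : m / 4 = j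
    · subst hjm
      simp only [if_pos rfl]
      have hr : m % 4 = 0 ∨ m % 4 = 1 ∨ m % 4 = 2 ∨ m % 4 = 3 := by omega
      unfold pvWOr
      rcases hr with hr | hr | hr | hr
      all_goals rw [hr]
      · rw [hfg (4*(m/4)+1) (by omega), hfg (4*(m/4)+2) (by omega), hfg (4*(m/4)+3) (by omega),
          hf0 (4*(m/4)) (by omega), hf0 (4*(m/4)+1) (by omega), hf0 (4*(m/4)+2) (by omega), hf0 (4*(m/4)+3) (by omega), show 4*(m/4) = m by omega, hgm]
        simp [PySem.Int.bor_zero, pv_zero_bor]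
      · rw [hfg (4*(m/4)) (by omega), hfg (4*(m/4)+2) (by omega), hfg (4*(m/4)+3) (by omega),
          hf0 (4*(m/4)+1) (by omega), hf0 (4*(m/4)+2) (by omega), hf0 (4*(m/4)+3) (by omega), show 4*(m/4)+1 = m by omega, hgm]
        simp [PySem.Int.bor_zero, pv_zero_bor]
      · rw [hfg (4*(m/4)) (by omega), hfg (4*(m/4)+1) (by omega), hfg (4*(m/4)+3) (by omega),
          hf0 (4*(m/4)+2) (by omega), hf0 (4*(m/4)+3) (by omega),
          show 4*(m/4)+2 = m by omega, hgm]
        simp [PySem.Int.bor_zero, pv_zero_bor]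
      · rw [hfg (4*(m/4)) (by omega), hfg (4*(m/4)+1) (by omega), hfg (4*(m/4)+2) (by omega),
          hf0 (4*(m/4)+3) (by omega),
          show 4*(m/4)+3 = m by omega, hgm]
        simp [PySem.Int.bor_zero, pv_zero_bor]
    · rw [if_neg hjm]
      unfold pvWOr
      rw [hfg (4*j) (by omega), hfg (4*j+1) (by omega), hfg (4*j+2) (by omega), hfg (4*j+3) (by omega)]

theorem pv_loop (cs : List Char) (N : Nat) (h : ∀ j, j < cs.length → j / 4 < N) :
    (PySem.List.enumerate cs 0).foldl
      (fun bl p =>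
        PySem.List.pySetD bl ((p.1 : Int) >>> (2 : Nat))
          (PySem.Int.bor (PySem.List.pyGetD bl ((p.1 : Int) >>> (2 : Nat)) 0)
            (PySem.Int.band ((p.2.toNat : Int)) 0xFF <<< (PySem.Int.mod p.1 4 * 8).toNat)))
      (List.replicate N 0)
      = (List.range N).map (pvWOr (pvBLoop cs)) := by
  induction cs using List.reverseRecOn with
  | nil =>
      simp only [PySem.List.enumerate_nil, List.foldl_nil]
      apply List.ext_getElem
      · simp
      · intro j hj hj'
        simp [pvWOr, pvBLoop, PySem.Int.bor_zero]
  | append_singleton xs c ih =>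
      rw [PySem.List.enumerate_append, List.foldl_append, ih (fun j hj => h j (by simp; omega))]
      simp only [PySem.List.enumerate_cons, PySem.List.enumerate_nil, List.foldl_cons, List.foldl_nil]
      have hsh : ((0 + (xs.length : Int)) >>> (2 : Nat)) = ((xs.length / 4 : Nat) : Int) := by
        rw [zero_add]
        have h1 : ((xs.length : Int) >>> (2 : Nat)) = ((xs.length >>> 2 : Nat) : Int) := by simp
        rw [h1, Nat.shiftRight_eq_div_pow]
      have hmod : (PySem.Int.mod (0 + (xs.length : Int)) 4 * 8).toNat = xs.length % 4 * 8 := by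
        rw [zero_add, show (4 : Int) = ((4 : Nat) : Int) from rfl, PySem.Int.mod_natCast,
          show ((xs.length % 4 : Nat) : Int) * 8 = ((xs.length % 4 * 8 : Nat) : Int) by push_cast; ring,
          Int.toNat_natCast]
      rw [hsh, hmod, PySem.List.pySetD_natCast, PySem.List.pyGetD_natCast]
      have := pv_step N xs.length (pvBLoop xs) (pvBLoop (xs ++ [c]))
        (PySem.Int.band ((c.toNat : Int)) 0xFF)
        (h xs.length (by simp))
        (fun p hp => by
          unfold pvBLoop
          rcases lt_trichotomy p xs.length with hlt | heq | hgt
          · simp [hlt, List.getD, List.getElem?_append_left hlt]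
            omega
          · exact absurd heq hp
          · rw [if_neg (by simp only [List.length_append, List.length_cons, List.length_nil]; omega),
                if_neg (by omega)])
        (fun p hp => by unfold pvBLoop; simp [show ¬ p < xs.length by omega])
        (by unfold pvBLoop
            simp [List.getD, List.getElem?_append_right (le_refl xs.length)])
      exact this

theorem pvByte_bound (cs : List Char) (j : Nat) : 0 ≤ pvByte cs j ∧ pvByte cs j < 256 := by
  unfold pvByte
  split_ifs with h1 h2
  · rw [show (0xFF : Int) = ((255 : Nat) : Int) from rfl, PySem.Int.band_natCast]
    have := Nat.and_le_right (n := (cs.getD j default).toNat) (m := 255)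
    omega
  · norm_num
  · norm_num

theorem pv_main (s : String) : str2binl_py s = str2binl_py_alt s := by
  simp only [str2binl_py, str2binl_py_alt]
  -- notation
  have hN : ∀ j, j < s.toList.length + 1 → j / 4 < (((s.toList.length + 8) >>> 6) + 1) * 16 := by
    intro j hj
    rw [Nat.shiftRight_eq_div_pow]
    omega
  -- bridge A's Int-valued block count to the Nat one
  have h1 : ((((s.toList.length : Int) + (8 : Int)) >>> (6 : Nat)) + (1 : Int)) * (16 : Int)
      = (((((s.toList.length + 8) >>> 6) + 1) * 16 : Nat) : Int) := by
    rw [show ((s.toList.length : Int) + (8 : Int)) = (((s.toList.length + 8 : Nat)) : Int) by push_cast; ring]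
    rw [show (((s.toList.length + 8 : Nat)) : Int) >>> (6 : Nat)
        = (((s.toList.length + 8) >>> 6 : Nat) : Int) by simp]
    push_cast
    ring
  rw [h1, Int.toNat_natCast]
  rw [pv_loop s.toList ((((s.toList.length + 8) >>> 6) + 1) * 16) (fun j hj => hN j (by omega))]
  -- the 0x80 sentinel write
  have hsh : ((s.toList.length : Int) >>> (2 : Nat)) = ((s.toList.length / 4 : Nat) : Int) := by
    rw [show ((s.toList.length : Int) >>> (2 : Nat)) = ((s.toList.length >>> 2 : Nat) : Int) by simp,
      Nat.shiftRight_eq_div_pow]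
  have hmod : (PySem.Int.mod (s.toList.length : Int) 4 * 8).toNat = s.toList.length % 4 * 8 := by
    rw [show (4 : Int) = ((4 : Nat) : Int) from rfl, PySem.Int.mod_natCast,
      show ((s.toList.length % 4 : Nat) : Int) * 8 = ((s.toList.length % 4 * 8 : Nat) : Int) by push_cast; ring,
      Int.toNat_natCast]
  rw [hsh, hmod, PySem.List.pySetD_natCast, PySem.List.pyGetD_natCast]
  rw [pv_step _ s.toList.length (pvBLoop s.toList) (pvByte s.toList) (0x80 : Int)
    (hN s.toList.length (by omega))
    (fun p hp => by
      unfold pvByte pvBLoop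
      rcases lt_or_ge p s.toList.length with hlt | hge
      · rw [if_pos hlt, if_pos hlt]
      · rw [if_neg (by omega), if_neg (by omega), if_neg (by omega)])
    (fun p hp => by unfold pvBLoop; rw [if_neg (by omega)])
    (by unfold pvByte; rw [if_neg (by omega), if_pos rfl])]
  -- the final length word
  have h2 : ((((((s.toList.length + 8) >>> 6) + 1) * 16 : Nat) : Int) - (2 : Int))
      = (((((s.toList.length + 8) >>> 6) + 1) * 16 - 2 : Nat) : Int) := by
    rw [Nat.cast_sub (by omega)]
    norm_num
  rw [h2, PySem.List.pySetD_natCast]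
  congr 1
  apply List.map_congr_left
  intro w _
  exact pvWOr_eq_add (pvByte s.toList) w (pvByte_bound s.toList)

-- ===== VERDICT (by name: the statement is the Claim_ definition above) =====
theorem str2binl_py_spec : Claim_equal_str2binl_py := by
  intro s _
  unfold Spec_str2binl_py
  exact pv_main s
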